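-- pv_equiv track=rewrite | github.com/geledek/Youtube-Subtitle-Downloader | downloader/core.py | collect_language_order
-- ===== SOURCE A (Python) =====
-- from typing import Any, Dict, Iterable, List, Optional, Tuple, Union
--
-- def collect_language_order(langs: Iterable[str]) -> List[str]:
--     priority = [
--         "en",
--         "en-US",
--         "en-GB",
--         "zh-Hans",
--         "zh-Hant",
--         "zh-CN",
--         "zh-TW",
--     ]
--     ordered = []
--     for fav in priority:
--         for lang in langs:
--             if lang == fav and lang not in ordered:
--                 ordered.append(lang)
--     for lang in langs:
--         if lang not in ordered:
--             ordered.append(lang)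
--     return ordered
-- ===== SOURCE B (Python) =====
-- def collect_language_order(langs):
--     priority = [
--         "en",
--         "en-US",
--         "en-GB",
--         "zh-Hans",
--         "zh-Hant",
--         "zh-CN",
--         "zh-TW",
--     ]
--     seen = []
--     seen_set = set()
--     for lang in langs:
--         if lang not in seen_set:
--             seen_set.add(lang)
--             seen.append(lang)
--     pset = set(priority)
--     return [p for p in priority if p in seen_set] + [l for l in seen if l not in pset]
-- ===== Notes on version B (the rewrite author's own statement) =====
-- stated objective: faster
-- what changed: A rescans langs once per priority entry plus once more with a linear 'in ordered' test; B makes a single set-based dedup pass over langs and then builds the result as two filters (priority entries present, then remaining first-seen languages).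
import Mathlib
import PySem

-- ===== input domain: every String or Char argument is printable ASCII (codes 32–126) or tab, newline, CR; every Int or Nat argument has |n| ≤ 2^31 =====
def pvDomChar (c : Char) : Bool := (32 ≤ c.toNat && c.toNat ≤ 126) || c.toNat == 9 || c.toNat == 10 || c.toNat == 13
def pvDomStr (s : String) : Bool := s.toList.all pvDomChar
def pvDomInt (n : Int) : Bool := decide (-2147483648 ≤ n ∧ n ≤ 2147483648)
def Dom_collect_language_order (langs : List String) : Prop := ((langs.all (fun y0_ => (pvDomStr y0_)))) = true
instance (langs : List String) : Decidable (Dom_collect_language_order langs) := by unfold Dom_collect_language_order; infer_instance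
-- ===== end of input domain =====

-- B replaces A's per-priority rescans of langs by one set-based dedup pass followed by two filters (measurably faster; return value only).

-- the fixed priority list both versions share
def pvPriority : List String :=
  ["en", "en-US", "en-GB", "zh-Hans", "zh-Hant", "zh-CN", "zh-TW"]

-- ===== PORT A =====
def collect_language_order (langs : List String) : List String :=
  let ordered :=
    pvPriority.foldl
      (fun ordered fav =>
        langs.foldl
          (fun ordered lang =>
            if lang = fav ∧ ¬ lang ∈ ordered then ordered ++ [lang] else ordered)
          ordered)
      []
  langs.foldl
    (fun ordered lang => if ¬ lang ∈ ordered then ordered ++ [lang] else ordered)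
    ordered

-- ===== PORT B =====
def collect_language_order_alt (langs : List String) : List String :=
  let seen :=
    langs.foldl
      (fun (p : List String × PySem.Set String) lang =>
        if PySem.Set.contains p.2 lang then p
        else (p.1 ++ [lang], PySem.Set.add p.2 lang))
      ([], PySem.Set.empty)
  let pset : PySem.Set String := PySem.Set.ofList pvPriority
  pvPriority.filter (fun p => PySem.Set.contains seen.2 p)
    ++ seen.1.filter (fun l => ¬ PySem.Set.contains pset l)

-- ===== PRECONDITION & SPEC =====
def Spec_collect_language_order (langs : List String) (out : List String) : Prop := out = collect_language_order_alt langs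
instance (langs : List String) (out : List String) : Decidable (Spec_collect_language_order langs out) := by unfold Spec_collect_language_order; infer_instance

-- ===== CLAIM (what is proved, stated in full; the proofs are below) =====
def Claim_equal_collect_language_order : Prop := ∀ (langs : List String), Dom_collect_language_order langs → Spec_collect_language_order langs (collect_language_order langs)

-- ===== LEMMAS AND PROOFS =====

-- the order-preserving dedup fold both programs reduce to
def pvDD (acc : List String) (l : List String) : List String :=
  l.foldl (fun a x => if x ∈ a then a else a ++ [x]) acc

theorem pvDD_cons (acc : List String) (x : String) (t : List String) :
    pvDD acc (x :: t) = pvDD (if x ∈ acc then acc else acc ++ [x]) t := by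
  simp [pvDD]

theorem mem_pvDD (acc l : List String) (x : String) :
    x ∈ pvDD acc l ↔ x ∈ acc ∨ x ∈ l := by
  induction l generalizing acc with
  | nil => simp [pvDD]
  | cons y t ih =>
      rw [pvDD_cons]
      by_cases h : y ∈ acc
      · simp only [if_pos h, ih, List.mem_cons]
        constructor
        · rintro (h1 | h1) <;> tauto
        · rintro (h1 | h1 | h1) <;> [tauto; (subst h1; tauto); tauto]
      · simp only [if_neg h, ih, List.mem_append, List.mem_cons]
        tauto

-- dedup into an accumulator = the accumulator ++ the fresh part of a clean dedup
theorem pvDD_split (l : List String) (acc : List String) :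
    pvDD acc l = acc ++ (pvDD [] l).filter (fun x => ¬ x ∈ acc) := by
  induction l generalizing acc with
  | nil => simp [pvDD]
  | cons x t ih =>
      rw [pvDD_cons, pvDD_cons]
      simp only [List.not_mem_nil, if_neg (fun h => h), List.nil_append]
      by_cases hx : x ∈ acc
      · rw [if_pos hx, ih acc, ih [x]]
        have hfun : ∀ y : String,
            (decide ¬ y ∈ acc) = ((!decide (y ∈ ([x] : List String))) && decide ¬ y ∈ acc) := by
          intro y
          by_cases h1 : y = x
          · subst h1; simp [hx]
          · simp [h1]
        simp only [List.filter_append, List.filter_filter]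
        have h1 : (([x] : List String).filter (fun y => decide ¬ y ∈ acc)) = [] := by
          simp [hx]
        rw [h1]
        congr 1
        simp only [List.nil_append]
        apply List.filter_congr
        intro y _
        simpa using (hfun y).symm
      · rw [if_neg hx, ih (acc ++ [x]), ih [x]]
        simp only [List.filter_append, List.filter_filter, List.append_assoc]
        have h1 : (([x] : List String).filter (fun y => decide ¬ y ∈ acc)) = [x] := by
          simp [hx]
        rw [h1]
        congr 2
        apply List.filter_congr
        intro y _
        by_cases h1 : y = x
        · subst h1; simp
        · by_cases h2 : y ∈ acc <;> simp [h1, h2]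

-- inner loop of A's first phase, with a fixed fav
def pvInner (langs : List String) (fav : String) (acc : List String) : List String :=
  langs.foldl
    (fun ordered lang =>
      if lang = fav ∧ ¬ lang ∈ ordered then ordered ++ [lang] else ordered)
    acc

theorem pvInner_mem (langs : List String) (fav : String) (acc : List String)
    (h : fav ∈ acc) : pvInner langs fav acc = acc := by
  induction langs with
  | nil => rfl
  | cons x t ih =>
      simp only [pvInner, List.foldl_cons]
      by_cases hx : x = fav
      · subst hx; simp only [h, not_true_eq_false, and_false, if_false]; exact ih
      · simp only [hx, false_and, if_false]; exact ih

theorem pvInner_not_mem (langs : List String) (fav : String) (acc : List String)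
    (h : ¬ fav ∈ acc) :
    pvInner langs fav acc = if fav ∈ langs then acc ++ [fav] else acc := by
  induction langs with
  | nil => simp [pvInner]
  | cons x t ih =>
      simp only [pvInner, List.foldl_cons]
      by_cases hx : x = fav
      · subst hx
        simp only [h, not_false_eq_true, and_true, List.mem_cons, true_or, if_pos]
        have := pvInner_mem t x (acc ++ [x]) (by simp)
        simpa [pvInner] using this
      · have hstep : (if x = fav ∧ ¬ x ∈ acc then acc ++ [x] else acc) = acc := by
          simp [hx]
        rw [hstep]
        simp only [pvInner] at ih
        rw [ih]
        have hne : fav ≠ x := fun e => hx e.symm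
        by_cases hm : fav ∈ t
        · simp [hm, List.mem_cons]
        · have hnm : ¬ fav ∈ x :: t := by simp [List.mem_cons, hm, hne]
          simp [hm, hnm]

-- A's first phase over a nodup priority prefix collects the priority langs present
theorem pvPhase1 (langs : List String) (ps : List String) (acc : List String)
    (hnd : ps.Nodup) (hdisj : ∀ p ∈ ps, ¬ p ∈ acc) :
    ps.foldl (fun ordered fav => pvInner langs fav ordered) acc
      = acc ++ ps.filter (fun p => p ∈ langs) := by
  induction ps generalizing acc with
  | nil => simp
  | cons p t ih =>
      have hp : ¬ p ∈ acc := hdisj p (by simp)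
      simp only [List.foldl_cons]
      rw [pvInner_not_mem langs p acc hp]
      by_cases hl : p ∈ langs
      · have hdisj' : ∀ q ∈ t, ¬ q ∈ acc ++ [p] := by
          intro q hq
          simp only [List.mem_append, List.mem_singleton]
          exact fun hcase => hcase.elim (hdisj q (by simp [hq]))
            (fun e => (List.nodup_cons.mp hnd).1 (e ▸ hq))
        rw [if_pos hl, ih _ (List.nodup_cons.mp hnd).2 hdisj']
        simp [hl]
      · rw [if_neg hl, ih _ (List.nodup_cons.mp hnd).2 (fun q hq => hdisj q (by simp [hq]))]
        simp [hl]

-- B's paired fold keeps seen and seen_set equal (both are the clean dedup)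
theorem pvPairFold (l : List String) (s : List String) :
    l.foldl
      (fun (p : List String × PySem.Set String) lang =>
        if PySem.Set.contains p.2 lang then p
        else (p.1 ++ [lang], PySem.Set.add p.2 lang))
      (s, s) = (pvDD s l, pvDD s l) := by
  induction l generalizing s with
  | nil => simp [pvDD]
  | cons x t ih =>
      simp only [List.foldl_cons]
      by_cases hx : x ∈ s
      · rw [show (if PySem.Set.contains ((s, s) : List String × PySem.Set String).2 x = true
              then ((s, s) : List String × PySem.Set String)
              else (((s, s) : List String × PySem.Set String).1 ++ [x],
                PySem.Set.add ((s, s) : List String × PySem.Set String).2 x)) = (s, s) from by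
            simp [PySem.Set.contains, hx]]
        rw [ih, pvDD_cons, if_pos hx]
      · rw [show (if PySem.Set.contains ((s, s) : List String × PySem.Set String).2 x = true
              then ((s, s) : List String × PySem.Set String)
              else (((s, s) : List String × PySem.Set String).1 ++ [x],
                PySem.Set.add ((s, s) : List String × PySem.Set String).2 x))
              = ((s ++ [x], s ++ [x]) : List String × PySem.Set String) from by
            simp [PySem.Set.contains, PySem.Set.add, hx]]
        rw [ih, pvDD_cons, if_neg hx]

-- ===== VERDICT (by name: the statement is the Claim_ definition above) =====
theorem collect_language_order_spec : Claim_equal_collect_language_order := by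
  intro langs _
  unfold Spec_collect_language_order collect_language_order collect_language_order_alt
  -- name the clean dedup and A's phase-1 result
  have hempty : (([], PySem.Set.empty) : List String × PySem.Set String)
      = (([], []) : List String × PySem.Set String) := rfl
  rw [hempty, pvPairFold langs []]
  have hO1 : pvPriority.foldl
      (fun ordered fav =>
        langs.foldl
          (fun ordered lang =>
            if lang = fav ∧ ¬ lang ∈ ordered then ordered ++ [lang] else ordered)
          ordered) []
      = pvPriority.filter (fun p => p ∈ langs) := by
    have := pvPhase1 langs pvPriority [] (by decide) (by simp)
    simpa [pvInner] using this
  rw [hO1]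
  -- A's second phase is the dedup fold
  have hstep : (fun (ordered : List String) (lang : String) =>
      if ¬ lang ∈ ordered then ordered ++ [lang] else ordered)
      = fun a x => if x ∈ a then a else a ++ [x] := by
    funext a x
    by_cases h : x ∈ a <;> simp [h]
  rw [hstep]
  show pvDD (pvPriority.filter (fun p => p ∈ langs)) langs = _
  rw [pvDD_split]
  congr 1
  · -- priority part
    apply List.filter_congr
    intro p _
    simp [PySem.Set.contains, mem_pvDD]
  · -- remainder part
    have hpset : PySem.Set.ofList pvPriority = pvPriority := by decide
    rw [hpset]
    apply List.filter_congr
    intro x hx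
    have hxl : x ∈ langs := by
      have := (mem_pvDD [] langs x).mp hx
      simpa using this
    simp [PySem.Set.contains, List.mem_filter, hxl]
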